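-- pv_equiv track=rewrite | github.com/maninka123/tennis-tour-dashboard | backend/tennis_api.py | _determine_sets_winner
-- ===== SOURCE A (Python) =====
-- def _determine_sets_winner(sets):
--     if not sets:
--         return None
--     p1_sets = sum(1 for s in sets if s['p1'] > s['p2'])
--     p2_sets = sum(1 for s in sets if s['p2'] > s['p1'])
--     if p1_sets > p2_sets:
--         return 1
--     if p2_sets > p1_sets:
--         return 2
--     return None
-- ===== SOURCE B (Python) =====
-- def _determine_sets_winner(sets):
--     # Cancellation stack: push each set's winner label; an opposing label on
--     # top cancels it (pop). With only two labels the stack stays homogeneous,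
--     # so the surviving top label (if any) is the overall winner.
--     stack = []
--     for s in sets:
--         if s['p1'] > s['p2']:
--             w = 1
--         elif s['p2'] > s['p1']:
--             w = 2
--         else:
--             continue
--         if stack and stack[-1] != w:
--             stack.pop()
--         else:
--             stack.append(w)
--     return stack[-1] if stack else None
-- ===== Notes on version B (the rewrite author's own statement) =====
-- stated objective: alternative
-- what changed: Replaces A's two counting passes and count comparison with a one-pass cancellation stack (Boyer-Moore pairing style): each set's winner label is pushed, an opposing label on top cancels it, and the surviving top label is the winner.
import Mathlib
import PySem

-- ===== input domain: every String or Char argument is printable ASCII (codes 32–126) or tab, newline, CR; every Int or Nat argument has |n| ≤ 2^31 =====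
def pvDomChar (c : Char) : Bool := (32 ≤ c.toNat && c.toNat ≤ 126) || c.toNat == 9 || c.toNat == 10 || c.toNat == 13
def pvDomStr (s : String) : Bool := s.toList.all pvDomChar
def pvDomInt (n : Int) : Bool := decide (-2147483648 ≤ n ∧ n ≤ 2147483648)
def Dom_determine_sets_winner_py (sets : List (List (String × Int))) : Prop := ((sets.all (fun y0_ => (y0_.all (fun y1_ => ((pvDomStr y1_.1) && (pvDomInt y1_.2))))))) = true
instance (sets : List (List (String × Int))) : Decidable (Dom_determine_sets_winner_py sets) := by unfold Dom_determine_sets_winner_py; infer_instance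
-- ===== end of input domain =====

-- B replaces A's two counting passes with a one-pass cancellation stack: push each set's
-- winner label, an opposing label on top cancels it, the surviving label wins (objective: alternative).

-- ===== PORT A =====
-- s['k'] = first-match lookup in the association list; Pre_ guarantees the key is present, so getD 0 is never the default inside Pre_.
def pyKey (s : List (String × Int)) (k : String) : Int := (s.lookup k).getD 0

def determine_sets_winner_py (sets : List (List (String × Int))) : Option Int :=
  if sets = [] then none
  else
    let p1_sets : Int := sets.foldl (fun acc s => if pyKey s "p1" > pyKey s "p2" then acc + 1 else acc) 0
    let p2_sets : Int := sets.foldl (fun acc s => if pyKey s "p2" > pyKey s "p1" then acc + 1 else acc) 0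
    if p1_sets > p2_sets then some 1
    else if p2_sets > p1_sets then some 2
    else none

-- ===== PORT B =====
-- push w, or pop when the top opposes w (Python: if stack and stack[-1] != w: pop else append)
def bPush (stack : List Int) (w : Int) : List Int :=
  if stack ≠ [] ∧ stack.getLast? ≠ some w then stack.dropLast else stack ++ [w]

def determine_sets_winner_py_alt (sets : List (List (String × Int))) : Option Int :=
  let stack : List Int := sets.foldl (fun stack s =>
    if pyKey s "p1" > pyKey s "p2" then bPush stack 1
    else if pyKey s "p2" > pyKey s "p1" then bPush stack 2
    else stack) []
  if stack = [] then none else stack.getLast?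

-- ===== PRECONDITION & SPEC =====
-- Pre_ excludes exactly the inputs where some set lacks key 'p1' or 'p2': Python A raises KeyError there (and B does too).
def Pre_determine_sets_winner_py (sets : List (List (String × Int))) : Prop :=
  ∀ s ∈ sets, (s.lookup "p1").isSome ∧ (s.lookup "p2").isSome
instance (sets : List (List (String × Int))) : Decidable (Pre_determine_sets_winner_py sets) := by unfold Pre_determine_sets_winner_py; infer_instance
def pvWitness_determine_sets_winner_py : (List (List (String × Int))) := [[("p1", 6), ("p2", 3)], [("p1", 4), ("p2", 6)], [("p1", 7), ("p2", 5)]]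

def Spec_determine_sets_winner_py (sets : List (List (String × Int))) (out : Option Int) : Prop := out = determine_sets_winner_py_alt sets
instance (sets : List (List (String × Int))) (out : Option Int) : Decidable (Spec_determine_sets_winner_py sets out) := by unfold Spec_determine_sets_winner_py; infer_instance

-- ===== CLAIM (what is proved, stated in full; the proofs are below) =====
def Claim_equal_determine_sets_winner_py : Prop := ∀ (sets : List (List (String × Int))), Dom_determine_sets_winner_py sets → Pre_determine_sets_winner_py sets → Spec_determine_sets_winner_py sets (determine_sets_winner_py sets)

-- ===== LEMMAS AND PROOFS =====

-- a homogeneous stack encoded by a signed size: a > 0 ↦ a ones, a < 0 ↦ -a twos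
def rep (a : Int) : List Int := if 0 ≤ a then List.replicate a.toNat 1 else List.replicate (-a).toNat 2

theorem rep_last (a : Int) :
    (if rep a = [] then none else (rep a).getLast?)
      = (if a > 0 then some 1 else if a < 0 then some 2 else none) := by
  unfold rep
  rcases lt_trichotomy a 0 with h | h | h
  · have h1 : ¬ (0:Int) ≤ a := by omega
    have h2 : (-a).toNat ≠ 0 := by omega
    have h3 : ¬ a > 0 := by omega
    simp [h1, h, h3, List.getLast?_replicate, h2]
  · subst h; simp
  · have h0 : (0:Int) ≤ a := by omega
    have h2 : a.toNat ≠ 0 := by omega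
    simp [h0, h, List.getLast?_replicate, h2]

theorem bPush_rep_one (a : Int) : bPush (rep a) 1 = rep (a + 1) := by
  unfold bPush rep
  rcases lt_trichotomy a 0 with h | h | h
  · have h1 : ¬ (0:Int) ≤ a := by omega
    have h2 : (-a).toNat ≠ 0 := by omega
    have hne : List.replicate (-a).toNat (2:Int) ≠ [] := by simp [h2]
    simp only [if_neg h1, List.getLast?_replicate]
    by_cases ha : a ≤ -2
    · have h1' : ¬ (0:Int) ≤ a + 1 := by omega
      simp [hne, h2, List.dropLast_replicate, h1']
      omega
    · have : a = -1 := by omega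
      subst this
      simp
  · subst h; simp
  · have h0 : (0:Int) ≤ a := by omega
    have h0' : (0:Int) ≤ a + 1 := by omega
    have h2 : a.toNat ≠ 0 := by omega
    have hc : (a+1).toNat = a.toNat + 1 := by omega
    simp [h0, h0', List.getLast?_replicate, h2, hc, List.replicate_succ']

theorem bPush_rep_two (a : Int) : bPush (rep a) 2 = rep (a - 1) := by
  unfold bPush rep
  rcases lt_trichotomy a 0 with h | h | h
  · have h1 : ¬ (0:Int) ≤ a := by omega
    have h1' : ¬ (0:Int) ≤ a - 1 := by omega
    have h2 : (-a).toNat ≠ 0 := by omega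
    have h1'' : ¬ (1:Int) ≤ a := by omega
    have hc : (1 - a).toNat = (-a).toNat + 1 := by omega
    simp [h1, List.getLast?_replicate, h2, h1'', hc, List.replicate_succ']
  · subst h; simp
  · have h0 : (0:Int) ≤ a := by omega
    have h2 : a.toNat ≠ 0 := by omega
    have hne : List.replicate a.toNat (1:Int) ≠ [] := by simp [h2]
    simp only [if_pos h0, List.getLast?_replicate]
    by_cases ha : 1 ≤ a - 1
    · have h0' : (0:Int) ≤ a - 1 := by omega
      simp [hne, h2, List.dropLast_replicate]
      omega
    · have : a = 1 := by omega
      subst this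
      simp

-- the stack after the fold is the homogeneous stack of the signed count difference
theorem fold_stack_rep (sets : List (List (String × Int))) (a : Int) :
    sets.foldl (fun stack s =>
      if pyKey s "p1" > pyKey s "p2" then bPush stack 1
      else if pyKey s "p2" > pyKey s "p1" then bPush stack 2
      else stack) (rep a)
    = rep (sets.foldl (fun net s =>
      if pyKey s "p1" > pyKey s "p2" then net + 1
      else if pyKey s "p2" > pyKey s "p1" then net - 1
      else net) a) := by
  induction sets generalizing a with
  | nil => rfl
  | cons s rest ih =>
    simp only [List.foldl_cons]
    by_cases h1 : pyKey s "p1" > pyKey s "p2"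
    · simp only [if_pos h1, bPush_rep_one]; exact ih (a + 1)
    · by_cases h2 : pyKey s "p2" > pyKey s "p1"
      · simp only [if_neg h1, if_pos h2, bPush_rep_two]; exact ih (a - 1)
      · simp only [if_neg h1, if_neg h2]; exact ih a

-- the signed net is A's p1 count minus A's p2 count
theorem net_eq_sub (sets : List (List (String × Int))) (a b : Int) :
    sets.foldl (fun net s =>
      if pyKey s "p1" > pyKey s "p2" then net + 1
      else if pyKey s "p2" > pyKey s "p1" then net - 1
      else net) (a - b)
    = sets.foldl (fun acc s => if pyKey s "p1" > pyKey s "p2" then acc + 1 else acc) a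
      - sets.foldl (fun acc s => if pyKey s "p2" > pyKey s "p1" then acc + 1 else acc) b := by
  induction sets generalizing a b with
  | nil => simp
  | cons s rest ih =>
    simp only [List.foldl_cons]
    by_cases h1 : pyKey s "p1" > pyKey s "p2"
    · have h2 : ¬ pyKey s "p2" > pyKey s "p1" := by omega
      simp only [if_pos h1, if_neg h2]
      have := ih (a + 1) b
      simpa [add_sub_right_comm] using this
    · by_cases h2 : pyKey s "p2" > pyKey s "p1"
      · simp only [if_neg h1, if_pos h2]
        have := ih a (b + 1)
        simpa [sub_add_eq_sub_sub] using this
      · simp only [if_neg h1, if_neg h2]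
        exact ih a b

-- ===== VERDICT (by name: the statement is the Claim_ definition above) =====
theorem determine_sets_winner_py_spec : Claim_equal_determine_sets_winner_py := by
  intro sets _ _
  unfold Spec_determine_sets_winner_py determine_sets_winner_py determine_sets_winner_py_alt
  have h0 : rep 0 = ([] : List Int) := rfl
  have hstack := fold_stack_rep sets 0
  rw [h0] at hstack
  simp only [hstack, rep_last]
  have hnet := net_eq_sub sets 0 0
  simp only [sub_zero] at hnet
  rw [hnet]
  set p1 := sets.foldl (fun acc s => if pyKey s "p1" > pyKey s "p2" then acc + 1 else acc) (0:Int)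
  set p2 := sets.foldl (fun acc s => if pyKey s "p2" > pyKey s "p1" then acc + 1 else acc) (0:Int)
  by_cases he : sets = []
  · subst he; simp [p1, p2]
  · simp only [if_neg he]
    by_cases h : p1 > p2 <;> by_cases h' : p2 > p1 <;> simp_all
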